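-- pv_equiv track=rewrite | github.com/BejaLab/opsintools-build | workflow/scripts/trim_prot.py | parse_alignment
-- ===== SOURCE A (Python) =====
-- def parse_alignment(aln_ref_seq, aln_query_seq, full_query_seq, ref_lysine_pos):
--     """
--     Parse the alignment keeping track of the positions of the aligned region
--     and of the reference non-gap positions
--     """
--     aln_start = aln_stop = aln_ref_start = -1
--     ref_pos = 0
--     query_has_lysine = False
--     # Locate the aligned region
--     for aln_pos, (ref_res, query_res) in enumerate(zip(aln_ref_seq, aln_query_seq)):
--         ref_gap = ref_res == '-'
--         query_gap = query_res == '-'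
--         ref_pos += not ref_gap
--         if not ref_gap and not query_gap:
--             if aln_start < 0:
--                 aln_start = aln_pos
--             aln_stop = aln_pos + 1
--             if ref_pos == ref_lysine_pos:
--                 assert ref_res == 'K', f"Expected lysine at ref position {ref_pos}, got {ref_res}"
--                 query_has_lysine = query_res == 'K'
--         if not ref_gap and aln_ref_start < 0:
--             aln_ref_start = aln_pos
--     query_start = query_stop = -1
--     aln_query_pos = 0
--     # Match the alignment of the query with the full-length sequence
--     # taking into account eventual gaps
--     for full_pos, full_res in enumerate(full_query_seq):
--         if full_res != 'X':
--             while aln_query_seq[aln_query_pos] == '-':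
--                 aln_query_pos += 1
--             assert full_res == aln_query_seq[aln_query_pos], f"The aligned sequence does not match the sequence in PDB at {full_pos}: {full_res} != {aln_query_seq[aln_query_pos]}"
--             if aln_query_pos == aln_start:
--                 query_start = full_pos
--             if aln_query_pos == aln_stop - 1:
--                 query_stop = full_pos + 1
--             aln_query_pos += 1
--     assert aln_start >= 0, "No aligned region"
--     return aln_start, aln_stop, aln_ref_start, query_start, query_stop, query_has_lysine
-- ===== SOURCE B (Python) =====
-- def parse_alignment(aln_ref_seq, aln_query_seq, full_query_seq, ref_lysine_pos):
--     """
--     Parse the alignment keeping track of the positions of the aligned region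
--     and of the reference non-gap positions
--     """
--     pairs = list(zip(aln_ref_seq, aln_query_seq))
--     # Index tables: columns where both sequences align, and non-gap reference columns
--     both = [i for i, (r, q) in enumerate(pairs) if r != '-' and q != '-']
--     refidx = [i for i, (r, _) in enumerate(pairs) if r != '-']
--     aln_start = both[0] if both else -1
--     aln_stop = both[-1] + 1 if both else -1
--     aln_ref_start = refidx[0] if refidx else -1
--     # The lysine column is the ref_lysine_pos-th non-gap reference column
--     query_has_lysine = False
--     if 1 <= ref_lysine_pos <= len(refidx):
--         r, q = pairs[refidx[ref_lysine_pos - 1]]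
--         if q != '-':
--             assert r == 'K', f"Expected lysine at ref position {ref_lysine_pos}, got {r}"
--             query_has_lysine = q == 'K'
--     # Map alignment columns back to full-sequence positions via the non-gap table
--     nongap = [i for i, c in enumerate(aln_query_seq) if c != '-']
--     query_start = query_stop = -1
--     rank = 0
--     for full_pos, full_res in enumerate(full_query_seq):
--         if full_res != 'X':
--             col = nongap[rank]
--             assert full_res == aln_query_seq[col], f"The aligned sequence does not match the sequence in PDB at {full_pos}: {full_res} != {aln_query_seq[col]}"
--             if col == aln_start:
--                 query_start = full_pos
--             if col == aln_stop - 1: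
--                 query_stop = full_pos + 1
--             rank += 1
--     assert aln_start >= 0, "No aligned region"
--     return aln_start, aln_stop, aln_ref_start, query_start, query_stop, query_has_lysine
-- ===== Notes on version B (the rewrite author's own statement) =====
-- stated objective: alternative
-- what changed: A's two stateful scans (a running-flag first pass and a second pass with a nested gap-skipping while loop) are replaced by index tables built once with comprehensions: aligned-column, non-gap-reference-column and non-gap-query-column lists, from which aln_start/aln_stop/aln_ref_start, the lysine column and the query positions are read off directly.
import Mathlib
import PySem

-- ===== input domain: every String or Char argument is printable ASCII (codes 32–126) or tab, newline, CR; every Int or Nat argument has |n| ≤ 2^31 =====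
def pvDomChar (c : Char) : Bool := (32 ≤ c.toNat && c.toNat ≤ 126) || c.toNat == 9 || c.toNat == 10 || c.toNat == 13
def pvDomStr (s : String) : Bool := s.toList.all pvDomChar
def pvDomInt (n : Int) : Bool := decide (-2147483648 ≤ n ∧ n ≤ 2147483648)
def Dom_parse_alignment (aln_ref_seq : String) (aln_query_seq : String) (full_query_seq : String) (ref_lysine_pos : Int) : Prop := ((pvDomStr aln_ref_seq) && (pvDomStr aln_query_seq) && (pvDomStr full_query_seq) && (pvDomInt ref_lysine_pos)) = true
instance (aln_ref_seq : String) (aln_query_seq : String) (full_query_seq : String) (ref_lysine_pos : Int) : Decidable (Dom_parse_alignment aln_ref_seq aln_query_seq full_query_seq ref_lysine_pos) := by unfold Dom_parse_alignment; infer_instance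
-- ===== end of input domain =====

-- B replaces A's two stateful scans by index tables (aligned columns, non-gap reference
-- columns, non-gap query columns) built once and consulted directly; objective: alternative
-- decomposition, same asymptotic cost.

-- ===== PORT A =====
-- first loop of A: state (aln_pos, aln_start, aln_stop, aln_ref_start, ref_pos, query_has_lysine);
-- none = the lysine assert fails
def pvA_loop1 (kpos : Int) : List (Char × Char) → Int → Int → Int → Int → Int → Bool → Option (Int × Int × Int × Bool)
  | [], _, astart, astop, aref, _, hasK => some (astart, astop, aref, hasK)
  | (r, q) :: rest, pos, astart, astop, aref, refpos, hasK =>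
    let refpos' := if r = '-' then refpos else refpos + 1
    let aref' := if r ≠ '-' ∧ aref < 0 then pos else aref
    if r ≠ '-' ∧ q ≠ '-' then
      let astart' := if astart < 0 then pos else astart
      if refpos' = kpos then
        if r = 'K' then pvA_loop1 kpos rest (pos + 1) astart' (pos + 1) aref' refpos' (decide (q = 'K'))
        else none
      else pvA_loop1 kpos rest (pos + 1) astart' (pos + 1) aref' refpos' hasK
    else pvA_loop1 kpos rest (pos + 1) astart astop aref' refpos' hasK

-- A's inner `while aln_query_seq[aln_query_pos] == '-'`: none = IndexError
def pvA_while (aq : List Char) (p : Nat) : Option (Nat × Char) :=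
  match h : aq[p]? with
  | none => none
  | some c => if c = '-' then pvA_while aq (p + 1) else some (p, c)
termination_by aq.length - p
decreasing_by
  have := (List.getElem?_eq_some_iff.mp h).1
  omega

-- second loop of A: none = IndexError or the matching assert fails
def pvA_loop2 (aq : List Char) : List Char → Int → Nat → Int → Int → Int → Int → Option (Int × Int)
  | [], _, _, qs, qe, _, _ => some (qs, qe)
  | c :: rest, fp, p, qs, qe, astart, astop =>
    if c ≠ 'X' then
      match pvA_while aq p with
      | none => none
      | some (j, ch) =>
        if c = ch then
          let qs' := if (j : Int) = astart then fp else qs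
          let qe' := if (j : Int) = astop - 1 then fp + 1 else qe
          pvA_loop2 aq rest (fp + 1) (j + 1) qs' qe' astart astop
        else none
    else pvA_loop2 aq rest (fp + 1) p qs qe astart astop

def parse_alignment (aln_ref_seq : String) (aln_query_seq : String) (full_query_seq : String) (ref_lysine_pos : Int) : Int × Int × Int × Int × Int × Bool :=
  (match pvA_loop1 ref_lysine_pos (aln_ref_seq.toList.zip aln_query_seq.toList) 0 (-1) (-1) (-1) 0 false with
   | none => none
   | some (astart, astop, aref, hasK) =>
     match pvA_loop2 aln_query_seq.toList full_query_seq.toList 0 0 (-1) (-1) astart astop with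
     | none => none
     | some (qs, qe) => if astart ≥ 0 then some (astart, astop, aref, qs, qe, hasK) else none
  ).getD (0, 0, 0, 0, 0, false)

-- ===== PORT B =====
-- [i for i, (r, q) in enumerate(pairs) if r != '-' and q != '-']
def pvB_both (pairs : List (Char × Char)) : List Int :=
  (PySem.List.enumerate pairs 0).filterMap (fun e => if e.2.1 ≠ '-' ∧ e.2.2 ≠ '-' then some e.1 else none)

-- [i for i, (r, _) in enumerate(pairs) if r != '-']
def pvB_ref (pairs : List (Char × Char)) : List Int :=
  (PySem.List.enumerate pairs 0).filterMap (fun e => if e.2.1 ≠ '-' then some e.1 else none)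

-- [i for i, c in enumerate(aln_query_seq) if c != '-']
def pvB_nongap (aq : List Char) : List Int :=
  (PySem.List.enumerate aq 0).filterMap (fun e => if e.2 ≠ '-' then some e.1 else none)

-- the lysine block of B; none = IndexError or the lysine assert fails
def pvB_lys (pairs : List (Char × Char)) (refidx : List Int) (kpos : Int) : Option Bool :=
  if 1 ≤ kpos ∧ kpos ≤ (refidx.length : Int) then
    match PySem.List.pyGet? refidx (kpos - 1) with
    | none => none
    | some i =>
      match PySem.List.pyGet? pairs i with
      | none => none
      | some rq => if rq.2 ≠ '-' then (if rq.1 = 'K' then some (decide (rq.2 = 'K')) else none) else some false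
  else some false

-- B's single pass over the full sequence with the rank counter; none = IndexError or assert
def pvB_loop2 (aq : List Char) (nongap : List Int) : List Char → Int → Nat → Int → Int → Int → Int → Option (Int × Int)
  | [], _, _, qs, qe, _, _ => some (qs, qe)
  | c :: rest, fp, rank, qs, qe, astart, astop =>
    if c ≠ 'X' then
      match nongap[rank]? with
      | none => none
      | some col =>
        match PySem.List.pyGet? aq col with
        | none => none
        | some ch =>
          if c = ch then
            let qs' := if col = astart then fp else qs
            let qe' := if col = astop - 1 then fp + 1 else qe
            pvB_loop2 aq nongap rest (fp + 1) (rank + 1) qs' qe' astart astop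
          else none
    else pvB_loop2 aq nongap rest (fp + 1) rank qs qe astart astop

def parse_alignment_alt (aln_ref_seq : String) (aln_query_seq : String) (full_query_seq : String) (ref_lysine_pos : Int) : Int × Int × Int × Int × Int × Bool :=
  (let pairs := aln_ref_seq.toList.zip aln_query_seq.toList
   let both := pvB_both pairs
   let refidx := pvB_ref pairs
   let astart := both.head?.getD (-1)
   let astop := match both.getLast? with | some i => i + 1 | none => (-1 : Int)
   let aref := refidx.head?.getD (-1)
   match pvB_lys pairs refidx ref_lysine_pos with
   | none => none
   | some hasK =>
     match pvB_loop2 aln_query_seq.toList (pvB_nongap aln_query_seq.toList) full_query_seq.toList 0 0 (-1) (-1) astart astop with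
     | none => none
     | some (qs, qe) => if astart ≥ 0 then some (astart, astop, aref, qs, qe, hasK) else none
  ).getD (0, 0, 0, 0, 0, false)

-- ===== PRECONDITION & SPEC =====
-- Pre_ = exactly the inputs on which Python A returns normally: some alignment column has both
-- residues non-gap (final assert), the reference residue at the ref_lysine_pos-th non-gap
-- reference column is 'K' whenever the query aligns there (lysine assert), and the non-'X'
-- residues of the full sequence are a prefix of the non-gap residues of the aligned query
-- (second-loop IndexError / matching assert).
def Pre_parse_alignment (aln_ref_seq : String) (aln_query_seq : String) (full_query_seq : String) (ref_lysine_pos : Int) : Prop :=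
  (aln_ref_seq.toList.zip aln_query_seq.toList).any (fun p => p.1 ≠ '-' && p.2 ≠ '-') = true
  ∧ (∀ i, (h : i < (aln_ref_seq.toList.zip aln_query_seq.toList).length) →
      (aln_ref_seq.toList.zip aln_query_seq.toList)[i].1 ≠ '-' →
      (aln_ref_seq.toList.zip aln_query_seq.toList)[i].2 ≠ '-' →
      ((((aln_ref_seq.toList.zip aln_query_seq.toList).take (i + 1)).countP (fun p => p.1 ≠ '-') : Int) = ref_lysine_pos) →
      (aln_ref_seq.toList.zip aln_query_seq.toList)[i].1 = 'K')
  ∧ (full_query_seq.toList.filter (· ≠ 'X')) <+: (aln_query_seq.toList.filter (· ≠ '-'))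
instance (aln_ref_seq : String) (aln_query_seq : String) (full_query_seq : String) (ref_lysine_pos : Int) : Decidable (Pre_parse_alignment aln_ref_seq aln_query_seq full_query_seq ref_lysine_pos) := by unfold Pre_parse_alignment; infer_instance

def pvWitness_parse_alignment : String × String × String × Int := ("K", "K", "K", 1)

def Spec_parse_alignment (aln_ref_seq : String) (aln_query_seq : String) (full_query_seq : String) (ref_lysine_pos : Int) (out : Int × Int × Int × Int × Int × Bool) : Prop := out = parse_alignment_alt aln_ref_seq aln_query_seq full_query_seq ref_lysine_pos
instance (aln_ref_seq : String) (aln_query_seq : String) (full_query_seq : String) (ref_lysine_pos : Int) (out : Int × Int × Int × Int × Int × Bool) : Decidable (Spec_parse_alignment aln_ref_seq aln_query_seq full_query_seq ref_lysine_pos out) := by unfold Spec_parse_alignment; infer_instance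

-- ===== CLAIM (what is proved, stated in full; the proofs are below) =====
def Claim_equal_parse_alignment : Prop := ∀ (aln_ref_seq : String) (aln_query_seq : String) (full_query_seq : String) (ref_lysine_pos : Int), Dom_parse_alignment aln_ref_seq aln_query_seq full_query_seq ref_lysine_pos → Pre_parse_alignment aln_ref_seq aln_query_seq full_query_seq ref_lysine_pos → Spec_parse_alignment aln_ref_seq aln_query_seq full_query_seq ref_lysine_pos (parse_alignment aln_ref_seq aln_query_seq full_query_seq ref_lysine_pos)

-- ===== LEMMAS AND PROOFS =====

-- structural index tables used to relate the two ports
def pvBothI (s : Int) : List (Char × Char) → List Int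
  | [] => []
  | p :: t => if p.1 ≠ '-' ∧ p.2 ≠ '-' then s :: pvBothI (s + 1) t else pvBothI (s + 1) t

def pvRefE (s : Int) : List (Char × Char) → List (Int × Char × Char)
  | [] => []
  | p :: t => if p.1 ≠ '-' then (s, p.1, p.2) :: pvRefE (s + 1) t else pvRefE (s + 1) t

def pvNgE (s : Int) : List Char → List (Int × Char)
  | [] => []
  | c :: t => if c = '-' then pvNgE (s + 1) t else (s, c) :: pvNgE (s + 1) t

-- closed form of A's first loop
def pvSpec1 (kpos : Int) (l : List (Char × Char)) (s : Int) (astart astop aref refpos : Int) (hasK : Bool) : Option (Int × Int × Int × Bool) :=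
  let both := pvBothI s l
  let refl := pvRefE s l
  let astart' := if astart < 0 then both.head?.getD astart else astart
  let astop' := match both.getLast? with | some i => i + 1 | none => astop
  let aref' := if aref < 0 then (refl.head?.map (·.1)).getD aref else aref
  let t := kpos - refpos
  match (if 1 ≤ t then refl[(t - 1).toNat]? else none) with
  | some e =>
    if e.2.2 ≠ '-' then (if e.2.1 = 'K' then some (astart', astop', aref', decide (e.2.2 = 'K')) else none)
    else some (astart', astop', aref', hasK)
  | none => some (astart', astop', aref', hasK)

theorem pv_bridge_both (l : List (Char × Char)) (s : Int) :
    (PySem.List.enumerate l s).filterMap (fun e => if e.2.1 ≠ '-' ∧ e.2.2 ≠ '-' then some e.1 else none) = pvBothI s l := by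
  induction l generalizing s with
  | nil => rfl
  | cons p t ih =>
      rw [PySem.List.enumerate_cons]
      simp only [List.filterMap_cons, pvBothI]
      by_cases h : p.1 ≠ '-' ∧ p.2 ≠ '-' <;> simpa [h] using ih (s + 1)


theorem pv_bridge_ref (l : List (Char × Char)) (s : Int) :
    (PySem.List.enumerate l s).filterMap (fun e => if e.2.1 ≠ '-' then some e.1 else none) = (pvRefE s l).map (·.1) := by
  induction l generalizing s with
  | nil => rfl
  | cons p t ih =>
      rw [PySem.List.enumerate_cons]
      simp only [List.filterMap_cons, pvRefE]
      by_cases h : p.1 ≠ '-' <;> simpa [h] using ih (s + 1)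


theorem pv_bridge_ng (l : List Char) (s : Int) :
    (PySem.List.enumerate l s).filterMap (fun e => if e.2 ≠ '-' then some e.1 else none) = (pvNgE s l).map (·.1) := by
  induction l generalizing s with
  | nil => rfl
  | cons c t ih =>
      rw [PySem.List.enumerate_cons]
      simp only [List.filterMap_cons, pvNgE]
      by_cases hc : c = '-' <;> simpa [hc] using ih (s + 1)


theorem pv_refE_mem (l : List (Char × Char)) (s : Int) (e : Int × Char × Char) (he : e ∈ pvRefE s l) :
    s ≤ e.1 ∧ l[(e.1 - s).toNat]? = some (e.2.1, e.2.2) := by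
  induction l generalizing s with
  | nil => simp [pvRefE] at he
  | cons p t ih =>
      simp only [pvRefE] at he
      split at he
      · rcases List.mem_cons.mp he with h | h
        · subst h
          simp
        · obtain ⟨h1, h2⟩ := ih (s + 1) h
          refine ⟨by omega, ?_⟩
          have : (e.1 - s).toNat = (e.1 - (s + 1)).toNat + 1 := by omega
          rw [this]
          simpa using h2
      · obtain ⟨h1, h2⟩ := ih (s + 1) he
        refine ⟨by omega, ?_⟩
        have : (e.1 - s).toNat = (e.1 - (s + 1)).toNat + 1 := by omega
        rw [this]
        simpa using h2


theorem pv_getLast_cons_match (s : Int) (l : List Int) (astop : Int) :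
    (match (s :: l).getLast? with | some i => i + 1 | none => astop) =
      (match l.getLast? with | some i => i + 1 | none => s + 1) := by
  cases h : l.getLast? <;> simp [List.getLast?_cons, h]

theorem pv_loop1_eq (kpos : Int) (l : List (Char × Char)) (s : Int) (hs : 0 ≤ s)
    (astart astop aref refpos : Int) (hasK : Bool) :
    pvA_loop1 kpos l s astart astop aref refpos hasK = pvSpec1 kpos l s astart astop aref refpos hasK := by
  induction l generalizing s astart astop aref refpos hasK with
  | nil =>
      simp only [pvA_loop1, pvSpec1, pvBothI, pvRefE]
      simp [ite_self]
  | cons p rest ih =>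
      obtain ⟨r, q⟩ := p
      have ihs := fun astart astop aref refpos hasK =>
        ih (s + 1) (by omega) astart astop aref refpos hasK
      by_cases hr : r = '-'
      · simp only [pvA_loop1, pvSpec1, pvBothI, pvRefE, ne_eq, hr, not_true_eq_false, false_and,
          if_false, reduceIte, ihs]
      · by_cases hq : q = '-'
        · -- ref non-gap, query gap
          simp only [pvA_loop1, pvSpec1, pvBothI, pvRefE, ne_eq, hr, hq, not_false_eq_true,
            not_true_eq_false, true_and, and_false, reduceIte, ihs]
          have ha2 : ¬ ((if aref < 0 then s else aref) < 0) := by split <;> omega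
          rcases lt_trichotomy (kpos - refpos) 1 with hT | hT | hT
          · have h1 : ¬ (1 ≤ kpos - refpos) := by omega
            have h2 : ¬ (1 ≤ kpos - (refpos + 1)) := by omega
            simp [h1, h2, ha2]
          · have h1 : (1 ≤ kpos - refpos) := by omega
            have h2 : ¬ (1 ≤ kpos - (refpos + 1)) := by omega
            have h0 : (kpos - refpos - 1).toNat = 0 := by omega
            simp [h1, h2, h0, ha2]
          · have h1 : (1 ≤ kpos - refpos) := by omega
            have h2 : (1 ≤ kpos - (refpos + 1)) := by omega
            have h0 : (kpos - refpos - 1).toNat = (kpos - (refpos + 1) - 1).toNat + 1 := by omega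
            simp [h1, h2, h0, ha2]
        · -- both non-gap
          simp only [pvA_loop1, pvSpec1, pvBothI, pvRefE, ne_eq, hr, hq, not_false_eq_true,
            true_and, and_true, reduceIte]
          have ha : ¬ ((if astart < 0 then s else astart) < 0) := by split <;> omega
          have ha2 : ¬ ((if aref < 0 then s else aref) < 0) := by split <;> omega
          by_cases hT1 : refpos + 1 = kpos
          · have h1 : (1 ≤ kpos - refpos) := by omega
            have h0 : (kpos - refpos - 1).toNat = 0 := by omega
            by_cases hK : r = 'K'
            · rw [if_pos hT1, if_pos hK, ihs]
              simp only [pvSpec1]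
              have h2 : ¬ (1 ≤ kpos - (refpos + 1)) := by omega
              simp [h1, h2, h0, hq, hK, ha, ha2, pv_getLast_cons_match]
            · rw [if_pos hT1, if_neg hK]
              simp [h1, h0, hq, hK]
          · rw [if_neg hT1, ihs]
            simp only [pvSpec1]
            rcases lt_trichotomy (kpos - refpos) 1 with hT | hT | hT
            · have h1 : ¬ (1 ≤ kpos - refpos) := by omega
              have h2 : ¬ (1 ≤ kpos - (refpos + 1)) := by omega
              simp [h1, h2, ha, ha2, pv_getLast_cons_match]
            · exact absurd hT (by omega)
            · have h1 : (1 ≤ kpos - refpos) := by omega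
              have h2 : (1 ≤ kpos - (refpos + 1)) := by omega
              have h0 : (kpos - refpos - 1).toNat = (kpos - (refpos + 1) - 1).toNat + 1 := by omega
              simp [h1, h2, h0, ha, ha2, pv_getLast_cons_match]

theorem pv_ngE_drop (aq : List Char) (p : Nat) (hp : p < aq.length) :
    pvNgE (p : Int) (aq.drop p) =
      if aq[p] = '-' then pvNgE (((p + 1 : Nat)) : Int) (aq.drop (p + 1))
      else (((p : Nat) : Int), aq[p]) :: pvNgE (((p + 1 : Nat)) : Int) (aq.drop (p + 1)) := by
  rw [List.drop_eq_getElem_cons hp]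
  simp only [pvNgE]
  split <;> norm_cast

theorem pv_ngE_step (aq : List Char) (p : Nat) (i : Int) (c : Char) (rest : List (Int × Char))
    (h : pvNgE (p : Int) (aq.drop p) = (i, c) :: rest) :
    ∃ j : Nat, i = (j : Int) ∧ p ≤ j ∧ aq[j]? = some c ∧ rest = pvNgE ((j : Int) + 1) (aq.drop (j + 1)) := by
  suffices H : ∀ (n p : Nat) (i : Int) (c : Char) (rest : List (Int × Char)),
      aq.length - p ≤ n → pvNgE (p : Int) (aq.drop p) = (i, c) :: rest →
      ∃ j : Nat, i = (j : Int) ∧ p ≤ j ∧ aq[j]? = some c ∧ rest = pvNgE ((j : Int) + 1) (aq.drop (j + 1)) by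
    exact H (aq.length - p) p i c rest le_rfl h
  intro n
  induction n with
  | zero =>
      intro p i c rest hle h
      rw [List.drop_eq_nil_of_le (by omega)] at h
      simp [pvNgE] at h
  | succ n ihn =>
      intro p i c rest hle h
      by_cases hp : p < aq.length
      · rw [pv_ngE_drop aq p hp] at h
        by_cases hg : aq[p] = '-'
        · rw [if_pos hg] at h
          obtain ⟨j, h1, h2, h3, h4⟩ := ihn (p + 1) i c rest (by omega) h
          exact ⟨j, h1, by omega, h3, h4⟩
        · rw [if_neg hg] at h
          simp only [List.cons.injEq, Prod.mk.injEq] at h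
          obtain ⟨⟨hi, hc⟩, hrest⟩ := h
          refine ⟨p, hi.symm, le_rfl, ?_, ?_⟩
          · rw [← hc]; exact List.getElem?_eq_getElem hp
          · rw [← hrest]; norm_cast
      · rw [List.drop_eq_nil_of_le (by omega)] at h
        simp [pvNgE] at h


theorem pv_while_eq (aq : List Char) (p : Nat) :
    pvA_while aq p = match (pvNgE (p : Int) (aq.drop p)).head? with
      | some e => some (e.1.toNat, e.2)
      | none => none := by
  fun_induction pvA_while aq p with
  | case1 p h =>
      rw [List.drop_eq_nil_of_le (List.getElem?_eq_none_iff.mp h)]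
      simp [pvNgE]
  | case2 p h ih =>
      have hp : p < aq.length := (List.getElem?_eq_some_iff.mp h).1
      have hpc : aq[p] = '-' := by
        have h2 := List.getElem?_eq_getElem hp
        rw [h] at h2
        exact (Option.some_inj.mp h2).symm
      rw [pv_ngE_drop aq p hp, if_pos hpc]
      exact ih
  | case3 p c h hc =>
      have hp : p < aq.length := (List.getElem?_eq_some_iff.mp h).1
      have hpc : aq[p] = c := by
        have h2 := List.getElem?_eq_getElem hp
        rw [h] at h2
        exact (Option.some_inj.mp h2).symm
      rw [pv_ngE_drop aq p hp, if_neg (by rw [hpc]; exact hc)]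
      simp [hpc]

theorem pv_loop2_eq (aq : List Char) (fl : List Char) (fp : Int) (p : Nat) (rank : Nat)
    (qs qe astart astop : Int)
    (hinv : (pvNgE 0 aq).drop rank = pvNgE (p : Int) (aq.drop p)) :
    pvA_loop2 aq fl fp p qs qe astart astop =
      pvB_loop2 aq ((pvNgE 0 aq).map (·.1)) fl fp rank qs qe astart astop := by
  induction fl generalizing fp p rank qs qe with
  | nil => simp [pvA_loop2, pvB_loop2]
  | cons c rest ih =>
      by_cases hx : c = 'X'
      · simp only [pvA_loop2, pvB_loop2, hx, ne_eq, not_true_eq_false, if_false]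
        exact ih (fp + 1) p rank qs qe hinv
      · simp only [pvA_loop2, pvB_loop2, ne_eq, hx, not_false_eq_true, if_true]
        rw [pv_while_eq]
        have hng : ((pvNgE 0 aq).map (·.1))[rank]? = ((pvNgE (p : Int) (aq.drop p)).head?).map (·.1) := by
          rw [List.getElem?_map, ← List.head?_drop, hinv]
        cases hh : (pvNgE (p : Int) (aq.drop p)).head? with
        | none => rw [hh] at hng; simp [hng]
        | some e =>
            obtain ⟨i, ch⟩ := e
            rw [hh] at hng
            obtain ⟨l', hl⟩ : ∃ tl, pvNgE (p : Int) (aq.drop p) = (i, ch) :: tl := by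
              cases hlist : pvNgE (p : Int) (aq.drop p) with
              | nil => rw [hlist] at hh; simp at hh
              | cons a t =>
                  rw [hlist] at hh
                  simp only [List.head?_cons, Option.some.injEq] at hh
                  exact ⟨t, by rw [← hh]⟩
            obtain ⟨j, hij, hpj, hget, hrest⟩ := pv_ngE_step aq p i ch l' hl
            subst hij
            simp only [hng, Option.map_some]
            have hcol : PySem.List.pyGet? aq ((j : Nat) : Int) = some ch := by
              rw [PySem.List.pyGet?_natCast]; exact hget
            simp only [hcol, Int.toNat_natCast]
            by_cases hcc : c = ch
            · simp only [hcc, reduceIte]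
              apply ih
              rw [← List.drop_drop, hinv, hl]
              simpa using hrest
            · simp [hcc]


theorem pv_spec1_glue (pairs : List (Char × Char)) (kpos : Int) :
    pvSpec1 kpos pairs 0 (-1) (-1) (-1) 0 false =
      (pvB_lys pairs ((pvRefE 0 pairs).map (·.1)) kpos).map (fun h =>
        ((pvBothI 0 pairs).head?.getD (-1),
         (match (pvBothI 0 pairs).getLast? with | some i => i + 1 | none => (-1 : Int)),
         ((pvRefE 0 pairs).map (·.1)).head?.getD (-1), h)) := by
  have hm1 : (-1 : Int) < 0 := by norm_num
  simp only [pvSpec1, pvB_lys, sub_zero, List.length_map, if_pos hm1]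
  by_cases h1 : 1 ≤ kpos
  · by_cases h2 : kpos ≤ ((pvRefE 0 pairs).length : Int)
    · have hlt : (kpos - 1).toNat < (pvRefE 0 pairs).length := by omega
      have hsome : (pvRefE 0 pairs)[(kpos - 1).toNat]? = some ((pvRefE 0 pairs)[(kpos - 1).toNat]) :=
        List.getElem?_eq_getElem hlt
      set e := (pvRefE 0 pairs)[(kpos - 1).toNat] with hedef
      have hmem : e ∈ pvRefE 0 pairs := List.getElem_mem hlt
      obtain ⟨hnn, hpair⟩ := pv_refE_mem pairs 0 e hmem
      have hcast : kpos - 1 = (((kpos - 1).toNat : Nat) : Int) := by omega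
      have hpg : PySem.List.pyGet? ((pvRefE 0 pairs).map (·.1)) (kpos - 1) = some e.1 := by
        rw [hcast, PySem.List.pyGet?_natCast, List.getElem?_map, hsome]
        rfl
      have hpy : PySem.List.pyGet? pairs e.1 = some (e.2.1, e.2.2) := by
        have hc2 : e.1 = ((e.1.toNat : Nat) : Int) := by omega
        rw [hc2, PySem.List.pyGet?_natCast]
        simpa using hpair
      rw [if_pos (And.intro h1 h2), if_pos h1, hsome, hpg]
      simp only [hpy]
      by_cases hq : e.2.2 = '-'
      · simp [hq, List.head?_map]
      · by_cases hK : e.2.1 = 'K' <;> simp [hq, hK, List.head?_map]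
    · have hnone : (pvRefE 0 pairs)[(kpos - 1).toNat]? = none := by
        rw [List.getElem?_eq_none_iff]
        omega
      have hg : ¬ (1 ≤ kpos ∧ kpos ≤ ((pvRefE 0 pairs).length : Int)) := by omega
      rw [if_pos h1, hnone, if_neg hg]
      simp [List.head?_map]
  · have hg : ¬ (1 ≤ kpos ∧ kpos ≤ ((pvRefE 0 pairs).length : Int)) := by omega
    rw [if_neg h1, if_neg hg]
    simp [List.head?_map]

theorem pv_main_eq (aln_ref_seq aln_query_seq full_query_seq : String) (ref_lysine_pos : Int) :
    parse_alignment aln_ref_seq aln_query_seq full_query_seq ref_lysine_pos =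
      parse_alignment_alt aln_ref_seq aln_query_seq full_query_seq ref_lysine_pos := by
  simp only [parse_alignment, parse_alignment_alt, pvB_both, pvB_ref, pvB_nongap,
    pv_bridge_both, pv_bridge_ref, pv_bridge_ng]
  rw [pv_loop1_eq _ _ 0 le_rfl, pv_spec1_glue]
  cases pvB_lys (aln_ref_seq.toList.zip aln_query_seq.toList)
      ((pvRefE 0 (aln_ref_seq.toList.zip aln_query_seq.toList)).map (·.1)) ref_lysine_pos with
  | none => rfl
  | some k =>
      simp only [Option.map_some]
      rw [pv_loop2_eq aln_query_seq.toList full_query_seq.toList 0 0 0 _ _ _ _ (by simp)]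

-- ===== VERDICT (by name: the statement is the Claim_ definition above) =====
theorem parse_alignment_spec : Claim_equal_parse_alignment := by
  intro R Q F k _ _
  unfold Spec_parse_alignment
  exact pv_main_eq R Q F k
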